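-- pv_equiv track=rewrite | github.com/matthewdholtkamp/testfile | scripts/build_causal_transitions.py | quality_mix_string
-- ===== SOURCE A (Python) =====
-- from collections import Counter, defaultdict
--
-- def normalize(value):
--     return ' '.join((value or '').split()).strip()
--
-- def source_quality(row):
--     return normalize(row.get('source_quality_tier')) or 'unknown'
--
-- def quality_mix_string(rows):
--     counts = Counter(source_quality(row) for row in rows if normalize(row.get('pmid')))
--     if not counts:
--         return 'unknown:0'
--     ordered = []
--     for label in ['full_text_like', 'abstract_only', 'unknown']:
--         if label in counts:
--             ordered.append(f'{label}:{counts[label]}')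
--     for label, count in counts.items():
--         if label not in {'full_text_like', 'abstract_only', 'unknown'}:
--             ordered.append(f'{label}:{count}')
--     return '; '.join(ordered)
-- ===== SOURCE B (Python) =====
-- from collections import Counter
--
--
-- def normalize(value):
--     return ' '.join((value or '').split()).strip()
--
--
-- def source_quality(row):
--     return normalize(row.get('source_quality_tier')) or 'unknown'
--
--
-- def quality_mix_string(rows):
--     counts = Counter(source_quality(row) for row in rows if normalize(row.get('pmid')))
--     if not counts:
--         return 'unknown:0'
--     priority = {'full_text_like': 0, 'abstract_only': 1, 'unknown': 2}
--     ordered = sorted(counts.items(), key=lambda kv: priority.get(kv[0], 3))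
--     return '; '.join(f'{label}:{count}' for label, count in ordered)
-- ===== Notes on version B (the rewrite author's own statement) =====
-- stated objective: simpler
-- what changed: The two formatting passes (a membership-checked scan over the three known labels, then a second scan over the Counter for the extra labels) are replaced by one stable sort of counts.items() under a priority key (known labels 0/1/2, everything else 3), relying on sort stability to keep extra labels in Counter insertion order.
import Mathlib
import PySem

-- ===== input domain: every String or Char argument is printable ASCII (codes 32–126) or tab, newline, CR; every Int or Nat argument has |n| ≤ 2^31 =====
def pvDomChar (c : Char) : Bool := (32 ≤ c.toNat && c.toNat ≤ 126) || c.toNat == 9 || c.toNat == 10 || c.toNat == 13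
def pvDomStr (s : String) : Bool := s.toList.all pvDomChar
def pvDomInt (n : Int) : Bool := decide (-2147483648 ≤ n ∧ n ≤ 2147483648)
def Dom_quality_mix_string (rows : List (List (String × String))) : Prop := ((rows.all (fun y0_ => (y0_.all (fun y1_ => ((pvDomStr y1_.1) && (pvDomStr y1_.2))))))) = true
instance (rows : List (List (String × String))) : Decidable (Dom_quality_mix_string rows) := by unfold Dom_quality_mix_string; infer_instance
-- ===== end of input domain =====

-- B replaces A's two formatting passes by one stable sort of the Counter items under a priority key (simpler decomposition, same cost).

-- ===== PORT A =====
-- normalize(value) = ' '.join((value or '').split()).strip()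
def pvNormalize (value : Option String) : String :=
  PySem.Str.strip (PySem.Str.join " " (PySem.Str.split₀ (value.getD "")))

-- source_quality(row) = normalize(row.get('source_quality_tier')) or 'unknown'
def pvSourceQuality (row : List (String × String)) : String :=
  let n := pvNormalize ((PySem.Dict.ofList row).get? "source_quality_tier")
  if n = "" then "unknown" else n

def quality_mix_string (rows : List (List (String × String))) : String :=
  let counts := PySem.Dict.counter
    ((rows.filter (fun row => pvNormalize ((PySem.Dict.ofList row).get? "pmid") ≠ "")).map pvSourceQuality)
  if counts.items = [] then "unknown:0"
  else
    let ordered := (["full_text_like", "abstract_only", "unknown"]).foldl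
      (fun acc label =>
        if counts.contains label then acc ++ [label ++ ":" ++ PySem.Int.toStr (counts.getD label 0)] else acc) []
    let ordered2 := counts.items.foldl
      (fun acc kv =>
        if !(["full_text_like", "abstract_only", "unknown"].contains kv.1) then
          acc ++ [kv.1 ++ ":" ++ PySem.Int.toStr kv.2]
        else acc) ordered
    PySem.Str.join "; " ordered2

-- ===== PORT B =====
-- priority = {'full_text_like': 0, 'abstract_only': 1, 'unknown': 2}
def pvPrio : PySem.Dict String Int :=
  PySem.Dict.ofList [("full_text_like", (0 : Int)), ("abstract_only", 1), ("unknown", 2)]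

def quality_mix_string_alt (rows : List (List (String × String))) : String :=
  let counts := PySem.Dict.counter
    ((rows.filter (fun row => pvNormalize ((PySem.Dict.ofList row).get? "pmid") ≠ "")).map pvSourceQuality)
  if counts.items = [] then "unknown:0"
  else
    let ordered := PySem.List.sorted counts.items (fun kv => pvPrio.getD kv.1 3) false
    PySem.Str.join "; " (ordered.map (fun kv => kv.1 ++ ":" ++ PySem.Int.toStr kv.2))

-- ===== PRECONDITION & SPEC =====
def Spec_quality_mix_string (rows : List (List (String × String))) (out : String) : Prop := out = quality_mix_string_alt rows
instance (rows : List (List (String × String))) (out : String) : Decidable (Spec_quality_mix_string rows out) := by unfold Spec_quality_mix_string; infer_instance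

-- ===== CLAIM (what is proved, stated in full; the proofs are below) =====
def Claim_equal_quality_mix_string : Prop := ∀ (rows : List (List (String × String))), Dom_quality_mix_string rows → Spec_quality_mix_string rows (quality_mix_string rows)

-- ===== LEMMAS AND PROOFS =====

theorem pv_insertBy_cons {α : Type} (before : α → α → Bool) (x y : α) (ys : List α) :
    PySem.List.insertBy before x (y :: ys) =
      if before x y then x :: y :: ys else y :: PySem.List.insertBy before x ys := rfl

theorem pv_insertBy_middle {α : Type} (before : α → α → Bool) (x : α) (as bs : List α)
    (h1 : ∀ a ∈ as, before x a = false) (h2 : ∀ b ∈ bs, before x b = true) :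
    PySem.List.insertBy before x (as ++ bs) = as ++ x :: bs := by
  induction as with
  | nil =>
    simp only [List.nil_append]
    cases bs with
    | nil => rfl
    | cons b bs => rw [pv_insertBy_cons, h2 b (by simp)]; simp
  | cons a as ih =>
    rw [List.cons_append, pv_insertBy_cons, h1 a (by simp)]
    simp only [Bool.false_eq_true, if_false, List.cons_append]
    rw [ih (fun a ha => h1 a (by simp [ha]))]

theorem pv_sorted_key_buckets {α : Type} (key : α → Int) (xs : List α)
    (hk : ∀ x ∈ xs, key x = 0 ∨ key x = 1 ∨ key x = 2 ∨ key x = 3) :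
    PySem.List.sorted xs key false =
      xs.filter (fun a => key a == 0) ++ xs.filter (fun a => key a == 1) ++
      xs.filter (fun a => key a == 2) ++ xs.filter (fun a => key a == 3) := by
  induction xs using List.reverseRecOn with
  | nil => rfl
  | append_singleton xs x ih =>
    have hx : key x = 0 ∨ key x = 1 ∨ key x = 2 ∨ key x = 3 := hk x (by simp)
    have hxs : ∀ y ∈ xs, key y = 0 ∨ key y = 1 ∨ key y = 2 ∨ key y = 3 :=
      fun y hy => hk y (by simp [hy])
    rw [PySem.List.sorted_eq_foldl_insertBy, List.foldl_append]
    simp only [List.foldl_cons, List.foldl_nil]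
    rw [← PySem.List.sorted_eq_foldl_insertBy, ih hxs]
    have memf : ∀ (i : Int) (a : α), a ∈ xs.filter (fun a => key a == i) → key a = i := by
      intro i a ha
      have := (List.mem_filter.1 ha).2
      simpa using this
    simp only [List.filter_append, List.filter_cons, List.filter_nil]
    rcases hx with h0 | h1 | h2 | h3
    · rw [List.append_assoc, List.append_assoc,
        pv_insertBy_middle _ x (xs.filter (fun a => key a == 0))
          (xs.filter (fun a => key a == 1) ++ (xs.filter (fun a => key a == 2) ++ xs.filter (fun a => key a == 3)))
          (by intro a ha; have := memf 0 a ha; simp only [decide_eq_false_iff_not]; omega)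
          (by intro b hb
              simp only [List.mem_append] at hb
              have : key b = 1 ∨ key b = 2 ∨ key b = 3 := by
                rcases hb with hb | hb | hb
                · exact Or.inl (memf 1 b hb)
                · exact Or.inr (Or.inl (memf 2 b hb))
                · exact Or.inr (Or.inr (memf 3 b hb))
              simp only [decide_eq_true_eq]; omega)]
      simp [h0, List.append_assoc]
    · rw [List.append_assoc, List.append_assoc, ← List.append_assoc (xs.filter (fun a => key a == 0)),
        pv_insertBy_middle _ x (xs.filter (fun a => key a == 0) ++ xs.filter (fun a => key a == 1))
          (xs.filter (fun a => key a == 2) ++ xs.filter (fun a => key a == 3))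
          (by intro a ha
              simp only [List.mem_append] at ha
              have : key a = 0 ∨ key a = 1 := by
                rcases ha with ha | ha
                · exact Or.inl (memf 0 a ha)
                · exact Or.inr (memf 1 a ha)
              simp only [decide_eq_false_iff_not]; omega)
          (by intro b hb
              simp only [List.mem_append] at hb
              have : key b = 2 ∨ key b = 3 := by
                rcases hb with hb | hb
                · exact Or.inl (memf 2 b hb)
                · exact Or.inr (memf 3 b hb)
              simp only [decide_eq_true_eq]; omega)]
      simp [h1, List.append_assoc]
    · rw [List.append_assoc, List.append_assoc, ← List.append_assoc (xs.filter (fun a => key a == 0)),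
        ← List.append_assoc (xs.filter (fun a => key a == 0) ++ xs.filter (fun a => key a == 1)),
        pv_insertBy_middle _ x
          (xs.filter (fun a => key a == 0) ++ xs.filter (fun a => key a == 1) ++ xs.filter (fun a => key a == 2))
          (xs.filter (fun a => key a == 3))
          (by intro a ha
              simp only [List.mem_append] at ha
              have : key a = 0 ∨ key a = 1 ∨ key a = 2 := by
                rcases ha with (ha | ha) | ha
                · exact Or.inl (memf 0 a ha)
                · exact Or.inr (Or.inl (memf 1 a ha))
                · exact Or.inr (Or.inr (memf 2 a ha))
              simp only [decide_eq_false_iff_not]; omega)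
          (by intro b hb
              have := memf 3 b hb
              simp only [decide_eq_true_eq]; omega)]
      simp [h2, List.append_assoc]
    · rw [PySem.List.insertBy_of_forall_not_before _ x _
          (by intro a ha
              simp only [List.mem_append] at ha
              have : key a = 0 ∨ key a = 1 ∨ key a = 2 ∨ key a = 3 := by
                rcases ha with ((ha | ha) | ha) | ha
                · exact Or.inl (memf 0 a ha)
                · exact Or.inr (Or.inl (memf 1 a ha))
                · exact Or.inr (Or.inr (Or.inl (memf 2 a ha)))
                · exact Or.inr (Or.inr (Or.inr (memf 3 a ha)))
              simp only [decide_eq_false_iff_not]; omega)]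
      simp [h3, List.append_assoc]

theorem pv_prio_eq (l : String) :
    pvPrio.getD l 3 =
      if l = "full_text_like" then 0 else if l = "abstract_only" then 1 else if l = "unknown" then 2 else 3 := by
  have h : pvPrio = ⟨[("full_text_like", (0 : Int)), ("abstract_only", 1), ("unknown", 2)]⟩ := rfl
  rw [h]
  by_cases h1 : l = "full_text_like"
  · simp [h1, PySem.Dict.getD, PySem.Dict.get?, List.find?]
  by_cases h2 : l = "abstract_only"
  · simp [h2, PySem.Dict.getD, PySem.Dict.get?, List.find?]
  by_cases h3 : l = "unknown"
  · simp [h3, PySem.Dict.getD, PySem.Dict.get?, List.find?]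
  · have e1 : ("full_text_like" == l) = false := (beq_eq_false_iff_ne).2 (Ne.symm h1)
    have e2 : ("abstract_only" == l) = false := (beq_eq_false_iff_ne).2 (Ne.symm h2)
    have e3 : ("unknown" == l) = false := (beq_eq_false_iff_ne).2 (Ne.symm h3)
    simp [PySem.Dict.getD, PySem.Dict.get?, List.find?, e1, e2, e3, h1, h2, h3]

theorem pv_filter_fst_map_nodup {κ ν : Type} [DecidableEq κ] (l : List κ) (hn : l.Nodup)
    (f : κ → ν) (c : κ) :
    ((l.map (fun k => (k, f k))).filter (fun kv => kv.1 = c)) =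
      if c ∈ l then [(c, f c)] else [] := by
  induction l with
  | nil => simp
  | cons a l ih =>
    have hn' := (List.nodup_cons.1 hn)
    by_cases hac : a = c
    · subst hac
      simp only [List.map_cons, List.filter_cons, decide_eq_true_eq, List.mem_cons, true_or, if_true]
      have : (l.map (fun k => (k, f k))).filter (fun kv => kv.1 = a) = [] := by
        rw [List.filter_eq_nil_iff]
        intro kv hkv
        simp only [List.mem_map] at hkv
        obtain ⟨k, hk, rfl⟩ := hkv
        simp only [decide_eq_true_eq]
        intro hka
        exact hn'.1 (hka ▸ hk)
      simp [this]
    · simp only [List.map_cons, List.filter_cons, decide_eq_true_eq, hac, if_false]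
      rw [ih hn'.2]
      have hca : ¬ c = a := fun h => hac h.symm
      simp [List.mem_cons, hca]

-- counts.contains c ↔ c is one of the counted labels
theorem pv_contains_counter (xs : List String) (c : String) :
    (PySem.Dict.counter xs).contains c = true ↔ c ∈ PySem.Set.ofList xs := by
  rw [show (PySem.Dict.counter xs).contains c = ((PySem.Dict.counter xs).items.any (fun p => p.1 == c)) from rfl,
    PySem.Dict.items_counter]
  simp [List.any_eq_true, PySem.Set.mem_ofList]

-- ===== VERDICT (by name: the statement is the Claim_ definition above) =====
theorem quality_mix_string_spec : Claim_equal_quality_mix_string := by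
  intro rows _
  unfold Spec_quality_mix_string quality_mix_string quality_mix_string_alt
  set tiers := ((rows.filter (fun row => pvNormalize ((PySem.Dict.ofList row).get? "pmid") ≠ "")).map pvSourceQuality) with htiers
  set counts := PySem.Dict.counter tiers with hcounts
  by_cases hemp : counts.items = []
  · simp [hemp]
  · simp only [hemp, if_false]
    -- the key takes only values 0..3
    have hkey : ∀ kv ∈ counts.items, (pvPrio.getD kv.1 3 = 0) ∨ (pvPrio.getD kv.1 3 = 1) ∨
        (pvPrio.getD kv.1 3 = 2) ∨ (pvPrio.getD kv.1 3 = 3) := by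
      intro kv _
      rw [pv_prio_eq]
      split_ifs <;> simp
    rw [pv_sorted_key_buckets _ _ hkey,
      PySem.List.foldl_append_if (fun kv => !(["full_text_like", "abstract_only", "unknown"].contains kv.1))
        (fun kv : String × Int => kv.1 ++ ":" ++ PySem.Int.toStr kv.2) counts.items]
    congr 1
    have f0 : List.filter (fun a => pvPrio.getD a.1 3 == 0) counts.items =
        List.filter (fun a : String × Int => a.1 = "full_text_like") counts.items := by
      apply List.filter_congr; intro kv _
      rw [pv_prio_eq]; split_ifs with u1 u2 u3 <;> simp [u1]
    have f1 : List.filter (fun a => pvPrio.getD a.1 3 == 1) counts.items =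
        List.filter (fun a : String × Int => a.1 = "abstract_only") counts.items := by
      apply List.filter_congr; intro kv _
      rw [pv_prio_eq]; split_ifs with u1 u2 u3 <;> simp_all
    have f2 : List.filter (fun a => pvPrio.getD a.1 3 == 2) counts.items =
        List.filter (fun a : String × Int => a.1 = "unknown") counts.items := by
      apply List.filter_congr; intro kv _
      rw [pv_prio_eq]; split_ifs with u1 u2 u3 <;> simp_all
    have f3 : List.filter (fun a => pvPrio.getD a.1 3 == 3) counts.items =
        List.filter (fun kv : String × Int => !(["full_text_like", "abstract_only", "unknown"].contains kv.1)) counts.items := by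
      apply List.filter_congr; intro kv _
      rw [pv_prio_eq]; split_ifs with u1 u2 u3 <;> simp_all
    rw [f0, f1, f2, f3]
    have hnd : (PySem.Set.ofList tiers : List String).Nodup := PySem.Set.nodup_ofList tiers
    have hitems : counts.items = (PySem.Set.ofList tiers).map (fun k => (k, (tiers.count k : Int))) :=
      PySem.Dict.items_counter tiers
    have hfix : ∀ c : String, List.filter (fun a : String × Int => a.1 = c) counts.items =
        if c ∈ PySem.Set.ofList tiers then [(c, (tiers.count c : Int))] else [] := by
      intro c
      rw [hitems]
      exact pv_filter_fst_map_nodup _ hnd _ c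
    rw [hfix "full_text_like", hfix "abstract_only", hfix "unknown"]
    have hcont : ∀ c : String, counts.contains c = decide (c ∈ PySem.Set.ofList tiers) := by
      intro c
      by_cases h : c ∈ PySem.Set.ofList tiers
      · simp only [h, decide_true]
        exact (pv_contains_counter tiers c).2 h
      · simp only [h, decide_false]
        rw [Bool.eq_false_iff]
        intro hc
        exact h ((pv_contains_counter tiers c).1 hc)
    have hgetD : ∀ c : String, counts.getD c 0 = (tiers.count c : Int) :=
      fun c => PySem.Dict.getD_counter tiers c
    simp only [List.foldl_cons, List.foldl_nil, hcont, hgetD]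
    by_cases m1 : "full_text_like" ∈ PySem.Set.ofList tiers <;>
      by_cases m2 : "abstract_only" ∈ PySem.Set.ofList tiers <;>
        by_cases m3 : "unknown" ∈ PySem.Set.ofList tiers <;>
          simp [m1, m2, m3]
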